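-- pv_equiv track=rewrite | github.com/Anyulund/Data_Structures | RemoveMax_Stack_Queue.py | remove_max
-- ===== SOURCE A (Python) =====
-- import collections
--
-- def validate_input(stack):
--  return stack and len(stack) > 0
--
-- def remove_max(stack):
--     if not validate_input(stack):
--         #throw exception
--         return -1 # we would throw an exception and wouldn't have to return -1
--                   # Returning -1 is not great, because that could actually be a max element in the stack
--
--     # First, find out the max value in the stack
--     queue1 = collections.deque() #allocate a queue (using a deque as just a regular queue).
--     max_element = -11111 # TBD fix
--
--     while len(stack) > 0:
--         element = stack.pop()
--         max_element = max(max_element, element)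
--         queue1.append(element)
--
--     # Now we know the value of the maximum element in the stack.
--     # Push elements from queue to the stack (which is now empty), with the exception of elements = max_element
--
--     while len(queue1) > 0:
--         element = queue1.popleft()
--         if element != max_element:
--             stack.append(element)
--
--     # Now stack has all emements exception those whose value is max_element
--     # However, the order of elements in the stack is wrong.
--     # Transfer from stack to queue.
--
--     while len(stack) > 0:
--         queue1.append(stack.pop())
--
--     # And back to the stack --- final step
--
--     while len(queue1) > 0:
--         stack.append(queue1.popleft())
--
--     return max_element
-- ===== SOURCE B (Python) =====
-- def remove_max(stack):
--     if not stack: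
--         return -1
--     max_element = max(stack)
--     stack[:] = [x for x in stack if x != max_element]
--     return max_element
-- ===== Notes on version B (the rewrite author's own statement) =====
-- stated objective: faster
-- what changed: Replaces the four deque/stack transfer loops with a single max() call and one list-comprehension filter assigned in place (constant-factor: two C-level passes instead of four Python-level element-by-element loops).
-- intended difference: On non-empty stacks whose elements are all below -11111, A's sentinel floor makes it return -11111 (and remove nothing), while B returns the true maximum of the stack, which is the intended result. — e.g. on remove_max([-99999]): A returns -11111, B returns -99999
import Mathlib
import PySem

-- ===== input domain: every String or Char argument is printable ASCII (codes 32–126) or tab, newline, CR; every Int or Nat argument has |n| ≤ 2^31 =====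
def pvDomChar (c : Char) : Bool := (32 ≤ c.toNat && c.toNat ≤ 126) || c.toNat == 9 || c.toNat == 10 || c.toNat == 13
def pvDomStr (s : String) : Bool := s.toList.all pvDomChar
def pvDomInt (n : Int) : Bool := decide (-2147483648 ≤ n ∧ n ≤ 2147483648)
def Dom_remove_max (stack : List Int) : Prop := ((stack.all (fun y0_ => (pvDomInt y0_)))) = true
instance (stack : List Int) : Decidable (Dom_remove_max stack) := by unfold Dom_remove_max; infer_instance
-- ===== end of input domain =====

-- B replaces A's four deque/stack transfer loops by one max() and one in-place filter; the
-- equivalence claimed is about the RETURN value only (both Pythons mutate the argument list,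
-- but not identically inside D_). B fixes A's -11111 sentinel floor (see D_ below).

-- ===== PORT A =====
-- while len(stack) > 0: element = stack.pop(); max_element = max(max_element, element); queue1.append(element)
-- (stack.pop() on a nonempty list is exactly getLast/dropLast)
def rmLoop1 (s q : List Int) (m : Int) : List Int × Int :=
  if h : s = [] then (q, m)
  else rmLoop1 s.dropLast (q ++ [s.getLast h]) (max m (s.getLast h))
  termination_by s.length
  decreasing_by
    have : s.length ≠ 0 := fun hl => h (List.eq_nil_of_length_eq_zero hl)
    simp [List.length_dropLast]; omega

-- while len(queue1) > 0: element = queue1.popleft(); if element != max_element: stack.append(element)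
def rmLoop2 (q s : List Int) (m : Int) : List Int :=
  match q with
  | [] => s
  | e :: q' => rmLoop2 q' (if e ≠ m then s ++ [e] else s) m

-- while len(stack) > 0: queue1.append(stack.pop())
def rmLoop3 (s q : List Int) : List Int :=
  if h : s = [] then q
  else rmLoop3 s.dropLast (q ++ [s.getLast h])
  termination_by s.length
  decreasing_by
    have : s.length ≠ 0 := fun hl => h (List.eq_nil_of_length_eq_zero hl)
    simp [List.length_dropLast]; omega

-- while len(queue1) > 0: stack.append(queue1.popleft())
def rmLoop4 (q s : List Int) : List Int :=
  match q with
  | [] => s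
  | e :: q' => rmLoop4 q' (s ++ [e])

def remove_max (stack : List Int) : Int :=
  if stack = [] then -1          -- not validate_input(stack)
  else
    let r := rmLoop1 stack [] (-11111)
    let q1 := r.1
    let max_element := r.2
    let s1 := rmLoop2 q1 [] max_element
    let q2 := rmLoop3 s1 []
    let _s2 := rmLoop4 q2 []     -- final stack contents (mutation; unused for the return value)
    max_element

-- ===== PORT B =====
def remove_max_alt (stack : List Int) : Int :=
  match PySem.List.max? stack (fun x => x) with   -- max(stack)
  | none => -1                                    -- if not stack: return -1
  | some m =>
    let _filtered := stack.filter (fun x => x ≠ m)  -- stack[:] = [x for x in stack if x != m]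
    m

-- ===== PRECONDITION & SPEC =====
-- On non-empty stacks whose elements are all below -11111, A's sentinel floor makes it return
-- -11111 (and remove nothing), while B returns the true maximum, which is the intended result.
def D_remove_max (stack : List Int) : Prop :=
  stack ≠ [] ∧ ∀ x ∈ stack, x < -11111
instance (stack : List Int) : Decidable (D_remove_max stack) := by unfold D_remove_max; infer_instance

def Spec_remove_max (stack : List Int) (out : Int) : Prop := ¬ D_remove_max stack → out = remove_max_alt stack
instance (stack : List Int) (out : Int) : Decidable (Spec_remove_max stack out) := by unfold Spec_remove_max; infer_instance

def pvDiffWitness_remove_max : List Int := [-99999]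
def pvDiffWitnessOut_remove_max : Int × Int := (-11111, -99999)

-- ===== CLAIM (what is proved, stated in full; the proofs are below) =====
def Claim_unchanged_remove_max : Prop := ∀ (stack : List Int), Dom_remove_max stack → Spec_remove_max stack (remove_max stack)
def Claim_changed_remove_max : Prop := Dom_remove_max (pvDiffWitness_remove_max) ∧ D_remove_max (pvDiffWitness_remove_max) ∧ remove_max (pvDiffWitness_remove_max) = pvDiffWitnessOut_remove_max.1 ∧ remove_max_alt (pvDiffWitness_remove_max) = pvDiffWitnessOut_remove_max.2 ∧ pvDiffWitnessOut_remove_max.1 ≠ pvDiffWitnessOut_remove_max.2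
def Claim_exact_remove_max : Prop := ∀ (stack : List Int), Dom_remove_max stack → D_remove_max stack → remove_max stack ≠ remove_max_alt stack

-- ===== LEMMAS AND PROOFS =====

-- max as a foldl accumulator commutes with taking max afterwards.
theorem foldl_max_swap (t : List Int) : ∀ (m e : Int), t.foldl max (max m e) = max (t.foldl max m) e := by
  induction t with
  | nil => intro m e; simp
  | cons a t ih => intro m e; simp only [List.foldl_cons]; rw [max_right_comm, ih]

-- A's first loop computes the running max of the whole stack, floored at the start value.
theorem rmLoop1_snd (s : List Int) : ∀ (q : List Int) (m : Int), (rmLoop1 s q m).2 = s.foldl max m := by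
  induction s using List.reverseRecOn with
  | nil => intro q m; simp [rmLoop1]
  | append_singleton t e ih =>
    intro q m
    rw [rmLoop1]
    simp only [List.append_ne_nil_of_right_ne_nil t (by simp : ([e] : List Int) ≠ [])]
    simp [ih, List.foldl_append, foldl_max_swap]

-- ===== VERDICT (by name: the statement is the Claim_ definition above) =====
-- A on a non-empty stack returns the stack's max floored at the sentinel -11111.
theorem remove_max_cons (x : Int) (xs : List Int) :
    remove_max (x :: xs) = max (xs.foldl max x) (-11111) := by
  rw [remove_max]
  simp [rmLoop1_snd]
  rw [max_comm (-11111) x, foldl_max_swap, max_comm]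

-- B on a non-empty stack returns the stack's true max.
theorem remove_max_alt_cons (x : Int) (xs : List Int) :
    remove_max_alt (x :: xs) = xs.foldl max x := by
  rw [remove_max_alt, PySem.List.max?_id_cons]

-- ===== VERDICT (by name: the statement is the Claim_ definition above) =====
theorem remove_max_spec : Claim_unchanged_remove_max := by
  intro stack _hdom hD
  show remove_max stack = remove_max_alt stack
  match stack with
  | [] => decide
  | x :: xs =>
    rw [remove_max_cons, remove_max_alt_cons]
    unfold D_remove_max at hD
    push Not at hD
    obtain ⟨y, hy, hge⟩ := hD (by simp)
    have hle : y ≤ xs.foldl max x :=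
      PySem.List.max?_isMax (PySem.List.max?_id_cons x xs) y hy
    omega

theorem remove_max_changed : Claim_changed_remove_max := by
  unfold Claim_changed_remove_max
  refine ⟨by decide, by decide, ?_, by decide, by decide⟩
  show remove_max [-99999] = -11111
  rw [remove_max]
  norm_num [rmLoop1_snd]


theorem remove_max_tight : Claim_exact_remove_max := by
  intro stack _hdom ⟨hne, hlt⟩
  match stack with
  | [] => exact absurd rfl hne
  | x :: xs =>
    rw [remove_max_cons, remove_max_alt_cons]
    have hmem : xs.foldl max x ∈ x :: xs :=
      PySem.List.max?_mem (PySem.List.max?_id_cons x xs)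
    have := hlt _ hmem
    omega
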